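-- pv_equiv track=rewrite | github.com/danCoder93/ENSF617-Probabilistic-Glucose-Forecasting | src/observability/debug_callbacks.py | _module_family_for_parameter_name
-- ===== SOURCE A (Python) =====
-- _BRANCH_FAMILIES: dict[str, tuple[str, ...]] = {
--     "tcn3": ("tcn3",),
--     "tcn5": ("tcn5",),
--     "tcn7": ("tcn7",),
--     "tft": ("tft",),
--     "grn": ("grn",),
--     "fcn": ("fcn",),
-- }
--
-- def _module_family_for_parameter_name(parameter_name: str) -> str | None:
--     """Map one parameter name to the high-level architectural family it belongs to.
--
--     Purpose:
--         Convert low-level parameter names such as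
--         `tft.encoder.variable_selection...weight` into a small, human-readable
--         family label such as `tft`.
--
--     Why this helper exists:
--         Raw parameter names are too detailed for the kind of training-forensics
--         summaries we want here. During debugging we usually care about whether a
--         *branch* is receiving signal, not whether an individual sub-layer inside
--         that branch had a slightly smaller norm than another.
--
--     Matching policy:
--         We intentionally use a simple prefix / substring policy rather than a
--         more elaborate module graph walk. The naming in this repo is already
--         descriptive enough that string-based grouping is stable, cheap, and easy
--         to understand.
--
--     Returns:
--         The family name when the parameter appears to belong to a tracked
--         branch, or `None` when the parameter does not match any known family.
--
--     Why `None` is a valid result: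
--         Some parameters may live outside the main branches we care about, or
--         the model may evolve later. Returning `None` lets the caller skip those
--         parameters without treating them as an error.
--     """
--     for family_name, prefixes in _BRANCH_FAMILIES.items():
--         if any(
--             parameter_name == prefix
--             or parameter_name.startswith(f"{prefix}.")
--             or f".{prefix}." in parameter_name
--             for prefix in prefixes
--         ):
--             return family_name
--     return None
-- ===== SOURCE B (Python) =====
-- _BRANCH_FAMILIES: dict[str, tuple[str, ...]] = {
--     "tcn3": ("tcn3",),
--     "tcn5": ("tcn5",),
--     "tcn7": ("tcn7",),
--     "tft": ("tft",),
--     "grn": ("grn",),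
--     "fcn": ("fcn",),
-- }
--
-- def _module_family_for_parameter_name(parameter_name: str) -> str | None:
--     # Tokenize once: a prefix matches iff it equals the whole name or occurs
--     # among the dot-separated segments other than the final one.
--     interior = set(parameter_name.split(".")[:-1])
--     for family_name, prefixes in _BRANCH_FAMILIES.items():
--         for prefix in prefixes:
--             if parameter_name == prefix or prefix in interior:
--                 return family_name
--     return None
-- ===== Notes on version B (the rewrite author's own statement) =====
-- stated objective: simpler
-- what changed: B splits the name on dots once and tests each family prefix by whole-name equality or membership in the set of non-final segments, instead of A's per-family startswith and dotted-substring scans.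
import Mathlib
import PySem

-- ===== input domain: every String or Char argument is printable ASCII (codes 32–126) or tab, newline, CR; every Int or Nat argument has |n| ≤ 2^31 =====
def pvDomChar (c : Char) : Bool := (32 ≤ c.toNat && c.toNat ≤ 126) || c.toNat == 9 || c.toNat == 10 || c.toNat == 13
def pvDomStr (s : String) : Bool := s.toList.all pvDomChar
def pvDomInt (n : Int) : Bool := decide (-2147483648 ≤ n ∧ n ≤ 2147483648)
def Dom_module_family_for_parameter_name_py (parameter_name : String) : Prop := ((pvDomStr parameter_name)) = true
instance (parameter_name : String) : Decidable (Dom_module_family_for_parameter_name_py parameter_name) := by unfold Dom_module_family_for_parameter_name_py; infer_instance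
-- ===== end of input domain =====

-- B splits the name on dots once and tests each prefix by whole-name equality or membership among
-- the non-final segments, replacing A's per-family startswith and dotted-substring scans (objective: simpler).

-- ===== PORT A =====
-- the module constant _BRANCH_FAMILIES (dict of family -> tuple of prefixes), in insertion order
def pvFamilies : List (String × List String) :=
  [("tcn3", ["tcn3"]), ("tcn5", ["tcn5"]), ("tcn7", ["tcn7"]),
   ("tft", ["tft"]), ("grn", ["grn"]), ("fcn", ["fcn"])]

-- the three tests of A: equality, dotted prefix, interior dotted substring
def pvCondA (parameter_name pfx : String) : Bool :=
  parameter_name == pfx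
    || PySem.Str.startswith parameter_name (pfx ++ ".")
    || PySem.Str.isIn ("." ++ pfx ++ ".") parameter_name

-- the for-loop over the dict: first family any of whose prefixes matches
def pvLoopA : List (String × List String) → String → Option String
  | [], _ => none
  | (fam, prefixes) :: rest, name =>
      if prefixes.any (fun p => pvCondA name p) then some fam else pvLoopA rest name

def module_family_for_parameter_name_py (parameter_name : String) : Option String :=
  pvLoopA pvFamilies parameter_name

-- ===== PORT B =====
-- the name split on dots (the separator is nonempty, so split? always returns a value)
def pvSegments (parameter_name : String) : List String :=
  match PySem.Str.split? parameter_name "." with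
  | some segs => segs
  | none => []

-- the set of segments other than the final one
def pvInterior (parameter_name : String) : PySem.Set String :=
  PySem.Set.ofList (pvSegments parameter_name).dropLast

-- the for-loop: first family whose prefix equals the whole name or is an interior segment
def pvLoopB : List (String × List String) → String → PySem.Set String → Option String
  | [], _, _ => none
  | (fam, prefixes) :: rest, name, interior =>
      if prefixes.any (fun p => name == p || interior.contains p) then some fam
      else pvLoopB rest name interior

def module_family_for_parameter_name_py_alt (parameter_name : String) : Option String :=
  pvLoopB pvFamilies parameter_name (pvInterior parameter_name)

-- ===== PRECONDITION & SPEC =====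
def Spec_module_family_for_parameter_name_py (parameter_name : String) (out : Option String) : Prop := out = module_family_for_parameter_name_py_alt parameter_name
instance (parameter_name : String) (out : Option String) : Decidable (Spec_module_family_for_parameter_name_py parameter_name out) := by unfold Spec_module_family_for_parameter_name_py; infer_instance

-- ===== CLAIM (what is proved, stated in full; the proofs are below) =====
def Claim_equal_module_family_for_parameter_name_py : Prop := ∀ (parameter_name : String), Dom_module_family_for_parameter_name_py parameter_name → Spec_module_family_for_parameter_name_py parameter_name (module_family_for_parameter_name_py parameter_name)

-- ===== LEMMAS AND PROOFS =====

-- a clean structural version of splitting on '.'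
def pvSplitDots : List Char → List (List Char)
  | [] => [[]]
  | c :: rest =>
      if c = '.' then [] :: pvSplitDots rest
      else
        match pvSplitDots rest with
        | [] => [[c]]
        | t :: ts => (c :: t) :: ts

theorem pvSplitDots_ne_nil (s : List Char) : pvSplitDots s ≠ [] := by
  cases s with
  | nil => simp [pvSplitDots]
  | cons c rest =>
      simp only [pvSplitDots]
      split
      · simp
      · split <;> simp

-- the fuel-based splitOn.go computes pvSplitDots (single-char separator '.')
theorem pvGo_eq' (fuel : Nat) (s cur : List Char) (acc : List (List Char))
    (h : s.length ≤ fuel) :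
    PySem.Chars.splitOn.go ['.'] fuel s cur acc
      = acc.reverse ++ (pvSplitDots s).modifyHead (fun t => cur.reverse ++ t) := by
  induction fuel generalizing s cur acc with
  | zero =>
      have hs : s = [] := List.eq_nil_of_length_eq_zero (Nat.le_zero.mp h)
      subst hs
      simp [PySem.Chars.splitOn.go, pvSplitDots]
  | succ n ih =>
      cases s with
      | nil => simp [PySem.Chars.splitOn.go, pvSplitDots]
      | cons c rest =>
          by_cases hc : c = '.'
          · subst hc
            have hpre : List.isPrefixOf ['.'] ('.' :: rest) = true := by simp [List.isPrefixOf]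
            rw [PySem.Chars.splitOn.go]
            simp only [hpre, if_pos]
            have hdrop : List.drop (List.length ['.']) ('.' :: rest) = rest := rfl
            rw [hdrop, ih rest [] (List.reverse cur :: acc) (by simpa using Nat.le_of_succ_le_succ h)]
            obtain ⟨t, ts, hts⟩ : ∃ t ts, pvSplitDots rest = t :: ts := by
              cases hx : pvSplitDots rest with
              | nil => exact absurd hx (pvSplitDots_ne_nil rest)
              | cons t ts => exact ⟨t, ts, rfl⟩
            simp [pvSplitDots, hts]
          · have hpre : List.isPrefixOf ['.'] (c :: rest) = false := by
              simp [List.isPrefixOf]; exact fun hh => absurd hh.symm hc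
            rw [PySem.Chars.splitOn.go]
            simp only [hpre, Bool.false_eq_true, if_neg, not_false_iff]
            rw [ih rest (c :: cur) acc (by simpa using Nat.le_of_succ_le_succ h)]
            obtain ⟨t, ts, hts⟩ : ∃ t ts, pvSplitDots rest = t :: ts := by
              cases hx : pvSplitDots rest with
              | nil => exact absurd hx (pvSplitDots_ne_nil rest)
              | cons t ts => exact ⟨t, ts, rfl⟩
            simp [pvSplitDots, hc, hts]

theorem pvSplitOn_eq (s : List Char) : PySem.Chars.splitOn s ['.'] = pvSplitDots s := by
  rw [PySem.Chars.splitOn, pvGo_eq' (s.length + 1) s [] [] (Nat.le_succ _)]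
  obtain ⟨t, ts, hts⟩ : ∃ t ts, pvSplitDots s = t :: ts := by
    cases hx : pvSplitDots s with
    | nil => exact absurd hx (pvSplitDots_ne_nil s)
    | cons t ts => exact ⟨t, ts, rfl⟩
  simp [hts]

theorem pvSplitDots_noDot (s : List Char) (h : '.' ∉ s) : pvSplitDots s = [s] := by
  induction s with
  | nil => rfl
  | cons c rest ih =>
      have hc : c ≠ '.' := fun hh => h (by simp [hh])
      have hr : '.' ∉ rest := fun hh => h (by simp [hh])
      simp [pvSplitDots, hc, ih hr]

theorem pvSplitDots_append (pre post : List Char) (h : '.' ∉ pre) :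
    pvSplitDots (pre ++ '.' :: post) = pre :: pvSplitDots post := by
  induction pre with
  | nil => simp [pvSplitDots]
  | cons c pre' ih =>
      have hc : c ≠ '.' := fun hh => h (by simp [hh])
      have hr : '.' ∉ pre' := fun hh => h (by simp [hh])
      simp [pvSplitDots, hc, ih hr]

-- prefix characterisation: p++"." is a prefix of pre++"."++post iff p = pre (no dots in p, pre)
theorem pvPrefix_iff (p pre post : List Char) (hp : '.' ∉ p) (hpre : '.' ∉ pre) :
    (p ++ ['.'] <+: pre ++ '.' :: post) ↔ p = pre := by
  induction p generalizing pre with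
  | nil =>
      cases pre with
      | nil => simp
      | cons b pre' =>
          have hb : b ≠ '.' := fun hh => hpre (by simp [hh])
          simp [List.cons_prefix_cons]
          exact fun hh => absurd hh.symm hb
  | cons a p' ih =>
      have ha : a ≠ '.' := fun hh => hp (by simp [hh])
      have hp' : '.' ∉ p' := fun hh => hp (by simp [hh])
      cases pre with
      | nil =>
          simp [List.cons_prefix_cons]
          exact fun hh => absurd hh ha
      | cons b pre' =>
          have hpre' : '.' ∉ pre' := fun hh => hpre (by simp [hh])
          simp [List.cons_prefix_cons, ih pre' hp' hpre', List.cons.injEq]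

-- an occurrence of "."++q must start at a dot, so it lies past the dot-free prefix
theorem pvInfix_shift (q pre post : List Char) (hpre : '.' ∉ pre) :
    ('.' :: q <:+: pre ++ '.' :: post) ↔ ('.' :: q <:+: '.' :: post) := by
  induction pre with
  | nil => simp
  | cons c pre' ih =>
      have hc : c ≠ '.' := fun hh => hpre (by simp [hh])
      have hr : '.' ∉ pre' := fun hh => hpre (by simp [hh])
      rw [List.cons_append, List.infix_cons_iff, ih hr]
      constructor
      · rintro (hpf | hi)
        · rw [List.cons_prefix_cons] at hpf
          exact absurd hpf.1.symm hc
        · exact hi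
      · exact fun hi => Or.inr hi

theorem pvDecomp (s : List Char) (hdot : '.' ∈ s) :
    ∃ pre post, '.' ∉ pre ∧ s = pre ++ '.' :: post := by
  induction s with
  | nil => cases hdot
  | cons c rest ih =>
      by_cases hc : c = '.'
      · exact ⟨[], rest, by simp, by simp [hc]⟩
      · have hr : '.' ∈ rest := by
          rcases List.mem_cons.mp hdot with hh | hh
          · exact absurd hh.symm hc
          · exact hh
        obtain ⟨pre, post, h1, h2⟩ := ih hr
        exact ⟨c :: pre, post, by simp [h1]; exact fun hh => absurd hh.symm hc, by simp [h2]⟩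

-- main characterisation: membership among the non-final segments = A's prefix/infix tests
theorem pvMemDropLast (p : List Char) (hp : '.' ∉ p) (s : List Char) :
    p ∈ (pvSplitDots s).dropLast ↔ (p ++ ['.'] <+: s ∨ ('.' :: (p ++ ['.'])) <:+: s) := by
  induction hn : s.length using Nat.strong_induction_on generalizing s with
  | _ n ihn =>
  subst hn
  by_cases hdot : '.' ∈ s
  · obtain ⟨pre, post, hpre, hs⟩ := pvDecomp s hdot
    subst hs
    rw [pvSplitDots_append pre post hpre]
    obtain ⟨t, ts, hts⟩ : ∃ t ts, pvSplitDots post = t :: ts := by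
      cases hx : pvSplitDots post with
      | nil => exact absurd hx (pvSplitDots_ne_nil post)
      | cons t ts => exact ⟨t, ts, rfl⟩
    rw [hts, List.dropLast_cons₂, ← hts]
    have hrec := ihn post.length (by simp only [List.length_append, List.length_cons]; omega) post rfl
    rw [List.mem_cons, hrec,
        pvPrefix_iff p pre post hp hpre, pvInfix_shift (p ++ ['.']) pre post hpre,
        List.infix_cons_iff, List.cons_prefix_cons]
    simp only [true_and]
  · rw [pvSplitDots_noDot s hdot]
    simp only [List.dropLast_singleton, List.not_mem_nil, false_iff]
    rintro (hpf | hi)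
    · exact hdot (hpf.subset (by simp))
    · exact hdot (hi.subset (by simp))

-- per-prefix condition equality, at the String level
theorem pvCond_eq (name pfx : String) (hp : '.' ∉ pfx.toList) :
    pvCondA name pfx = (name == pfx || (pvInterior name).contains pfx) := by
  have hseg : pvSegments name = List.map String.ofList (pvSplitDots name.toList) := by
    unfold pvSegments
    rw [PySem.Str.split?]
    have : PySem.Chars.split? name.toList ".".toList
        = some (pvSplitDots name.toList) := by
      rw [PySem.Chars.split?]
      have hsep : (".".toList) = ['.'] := rfl
      rw [hsep]
      simp [pvSplitOn_eq]
    rw [this]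
    rfl
  rw [Bool.eq_iff_iff]
  simp only [pvCondA, Bool.or_eq_true, beq_iff_eq, PySem.Str.startswith_eq,
    PySem.Chars.startswith_iff, PySem.Str.isIn_iff_infix,
    PySem.Set.contains_iff, pvInterior, PySem.Set.mem_ofList, hseg]
  have h1 : (pfx ++ ".").toList = pfx.toList ++ ['.'] := by
    rw [String.toList_append]; rfl
  have h2 : ("." ++ pfx ++ ".").toList = '.' :: (pfx.toList ++ ['.']) := by
    rw [String.toList_append, String.toList_append]; rfl
  rw [h1, h2]
  have h3 : pfx ∈ (List.map String.ofList (pvSplitDots name.toList)).dropLast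
      ↔ pfx.toList ∈ (pvSplitDots name.toList).dropLast := by
    rw [← List.map_dropLast, List.mem_map]
    constructor
    · rintro ⟨l, hl, rfl⟩
      simpa using hl
    · intro hl
      exact ⟨pfx.toList, hl, by simp⟩
  rw [h3, pvMemDropLast pfx.toList hp name.toList]
  tauto

-- ===== VERDICT (by name: the statement is the Claim_ definition above) =====
theorem module_family_for_parameter_name_py_spec : Claim_equal_module_family_for_parameter_name_py := by
  intro name _
  unfold Spec_module_family_for_parameter_name_py
  show pvLoopA pvFamilies name = pvLoopB pvFamilies name (pvInterior name)
  simp only [pvFamilies, pvLoopA, pvLoopB, List.any_cons, List.any_nil, Bool.or_false]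
  rw [pvCond_eq name "tcn3" (by decide), pvCond_eq name "tcn5" (by decide),
      pvCond_eq name "tcn7" (by decide), pvCond_eq name "tft" (by decide),
      pvCond_eq name "grn" (by decide), pvCond_eq name "fcn" (by decide)]
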